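-- pv_equiv track=rewrite | github.com/omeshv/covid-dash-app-master | apps/baselib.py | getRowAndColPos
-- ===== SOURCE A (Python) =====
-- def getSpecDef(reportCount):
--     maxRows = 4
--     maxCols = 3
--     specDef = None
--     if reportCount == 1:
--         maxRows = 2
--         maxCols = 2
--         specDef = [[{"rowspan": 2, "colspan": 2}, None],
--                    [None, None]]
--     elif reportCount == 2:
--         maxRows = 1
--         maxCols = 2
--         specDef = [[{"rowspan": 1, "colspan": 1}, {"rowspan": 1, "colspan": 1}]]
--     elif reportCount == 3:
--         maxRows = 1
--         maxCols = 3
--         specDef = [[{}, {}, {}]]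
--     elif reportCount == 4:
--         maxRows = 2
--         maxCols = 2
--         specDef = [[{}, {}],
--                    [{}, {}]
--                    ]
--     elif reportCount == 5:
--         maxRows = 2
--         maxCols = 3
--         specDef = [[{}, {}, {}],
--                    [{"rowspan": 1, "colspan": 1}, {"rowspan": 1, "colspan": 2}, None]
--                    ]
--     elif reportCount == 6:
--         maxRows = 2
--         maxCols = 3
--         specDef = [[{}, {}, {}],
--                    [{}, {}, {}]
--                    ]
--     elif reportCount == 7:
--         maxRows = 3
--         maxCols = 3
--         specDef = [[{"rowspan": 1, "colspan": 1}, {"rowspan": 1, "colspan": 1}, {"rowspan": 1, "colspan": 1}],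
--                    [{"rowspan": 2, "colspan": 1}, {"rowspan": 2, "colspan": 1}, {"rowspan": 1, "colspan": 1}],
--                    [None, None, {"rowspan": 1, "colspan": 1}],
--                    ]
--     elif reportCount == 8:
--         maxRows = 3
--         maxCols = 3
--         specDef = [[{"rowspan": 2, "colspan": 1}, {"rowspan": 1, "colspan": 1}, {"rowspan": 1, "colspan": 1}],
--                    [None, {"rowspan": 1, "colspan": 1}, {"rowspan": 1, "colspan": 1}],
--                    [{"rowspan": 1, "colspan": 1}, {"rowspan": 1, "colspan": 1}, {"rowspan": 1, "colspan": 1}],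
--                    ]
--     elif reportCount == 9:
--         maxRows = 3
--         maxCols = 3
--         specDef = [[{}, {}, {}],
--                    [{}, {}, {}],
--                    [{}, {}, {}]
--                    ]
--     elif reportCount == 10:
--         maxRows = 4
--         maxCols = 3
--         specDef = [[{"rowspan": 1, "colspan": 1}, {"rowspan": 1, "colspan": 1}, {"rowspan": 1, "colspan": 1}],
--                    [{"rowspan": 1, "colspan": 1}, {"rowspan": 1, "colspan": 1}, {"rowspan": 1, "colspan": 1}],
--                    [{"rowspan": 2, "colspan": 1}, {"rowspan": 2, "colspan": 1}, {"rowspan": 1, "colspan": 1}],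
--                    [None, None, {"rowspan": 1, "colspan": 1}],
--                    ]
--     elif reportCount == 11:
--         maxRows = 4
--         maxCols = 3
--         specDef = [[{"rowspan": 1, "colspan": 1}, {"rowspan": 1, "colspan": 1}, {"rowspan": 1, "colspan": 1}],
--                    [{"rowspan": 1, "colspan": 1}, {"rowspan": 1, "colspan": 1}, {"rowspan": 1, "colspan": 1}],
--                    [{"rowspan": 2, "colspan": 1}, {"rowspan": 1, "colspan": 1}, {"rowspan": 1, "colspan": 1}],
--                    [None, {"rowspan": 1, "colspan": 1}, {"rowspan": 1, "colspan": 1}],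
--                    ]
--     elif reportCount == 12:
--         maxRows = 4
--         maxCols = 3
--         specDef = [[{"rowspan": 1, "colspan": 1}, {"rowspan": 1, "colspan": 1}, {"rowspan": 1, "colspan": 1}],
--                    [{"rowspan": 1, "colspan": 1}, {"rowspan": 1, "colspan": 1}, {"rowspan": 1, "colspan": 1}],
--                    [{"rowspan": 1, "colspan": 1}, {"rowspan": 1, "colspan": 1}, {"rowspan": 1, "colspan": 1}]
--                    ]
--
--     return maxRows, maxCols, specDef;
--
-- def getRowAndColPos(currentSeq, reportCount):
--     maxRow, maxCol, specDef = getSpecDef(reportCount)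
--     counter = 0
--     for r in range(maxRow):
--         for c in range(maxCol):
--             if specDef[r][c] != None:
--                 counter = counter + 1
--             if counter == currentSeq:
--                 return r + 1, c + 1
--     return -1, -1
-- ===== SOURCE B (Python) =====
-- # Precomputed lookup table: for each supported report layout, the 1-indexed
-- # (row, col) positions of its non-None cells, in row-major order.
-- _POSITIONS = {
--     1: [(1, 1)],
--     2: [(1, 1), (1, 2)],
--     3: [(1, 1), (1, 2), (1, 3)],
--     4: [(1, 1), (1, 2), (2, 1), (2, 2)],
--     5: [(1, 1), (1, 2), (1, 3), (2, 1), (2, 2)],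
--     6: [(1, 1), (1, 2), (1, 3), (2, 1), (2, 2), (2, 3)],
--     7: [(1, 1), (1, 2), (1, 3), (2, 1), (2, 2), (2, 3), (3, 3)],
--     8: [(1, 1), (1, 2), (1, 3), (2, 2), (2, 3), (3, 1), (3, 2), (3, 3)],
--     9: [(1, 1), (1, 2), (1, 3), (2, 1), (2, 2), (2, 3), (3, 1), (3, 2), (3, 3)],
--     10: [(1, 1), (1, 2), (1, 3), (2, 1), (2, 2), (2, 3), (3, 1), (3, 2), (3, 3), (4, 3)],
--     11: [(1, 1), (1, 2), (1, 3), (2, 1), (2, 2), (2, 3), (3, 1), (3, 2), (3, 3), (4, 2), (4, 3)],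
--     12: [(1, 1), (1, 2), (1, 3), (2, 1), (2, 2), (2, 3), (3, 1), (3, 2), (3, 3)],
-- }
--
--
-- def getRowAndColPos(currentSeq, reportCount):
--     positions = _POSITIONS[reportCount]
--     if 1 <= currentSeq <= len(positions):
--         return positions[currentSeq - 1]
--     return -1, -1
-- ===== Notes on version B (the rewrite author's own statement) =====
-- stated objective: alternative
-- what changed: Replaces A's counting double scan of the layout grid by a precomputed per-layout table of the 1-indexed non-None cell positions and a single bounds-checked indexed lookup.
import Mathlib
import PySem

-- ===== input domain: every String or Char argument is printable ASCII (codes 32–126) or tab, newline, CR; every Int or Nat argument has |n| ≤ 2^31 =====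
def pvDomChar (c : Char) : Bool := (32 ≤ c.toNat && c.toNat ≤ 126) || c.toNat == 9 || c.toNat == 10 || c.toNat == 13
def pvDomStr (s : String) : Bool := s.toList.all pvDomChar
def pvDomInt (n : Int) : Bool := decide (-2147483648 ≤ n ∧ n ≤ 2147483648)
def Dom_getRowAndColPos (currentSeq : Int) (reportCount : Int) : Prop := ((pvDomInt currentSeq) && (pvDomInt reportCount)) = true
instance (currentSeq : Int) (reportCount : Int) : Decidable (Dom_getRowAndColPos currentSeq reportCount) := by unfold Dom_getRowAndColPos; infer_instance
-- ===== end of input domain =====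

-- B replaces A's grid scan (counting double loop with early return) by a precomputed
-- per-layout table of non-None cell positions plus a direct indexed lookup
-- (objective: alternative decomposition; same cost on these fixed-size grids).

-- ===== PORT A =====
-- Shared helper of A. The grid cells only matter as None (false) vs dict (true),
-- so a cell is ported as Bool; specDef = None is Option.none.
def getSpecDef (reportCount : Int) : Int × Int × Option (List (List Bool)) :=
  if reportCount = 1 then (2, 2, some [[true, false], [false, false]])
  else if reportCount = 2 then (1, 2, some [[true, true]])
  else if reportCount = 3 then (1, 3, some [[true, true, true]])
  else if reportCount = 4 then (2, 2, some [[true, true], [true, true]])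
  else if reportCount = 5 then (2, 3, some [[true, true, true], [true, true, false]])
  else if reportCount = 6 then (2, 3, some [[true, true, true], [true, true, true]])
  else if reportCount = 7 then (3, 3, some [[true, true, true], [true, true, true], [false, false, true]])
  else if reportCount = 8 then (3, 3, some [[true, true, true], [false, true, true], [true, true, true]])
  else if reportCount = 9 then (3, 3, some [[true, true, true], [true, true, true], [true, true, true]])
  else if reportCount = 10 then (4, 3, some [[true, true, true], [true, true, true], [true, true, true], [false, false, true]])
  else if reportCount = 11 then (4, 3, some [[true, true, true], [true, true, true], [true, true, true], [false, true, true]])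
  else if reportCount = 12 then (4, 3, some [[true, true, true], [true, true, true], [true, true, true]])
  else (4, 3, none)

-- inner `for c in range(maxCol)` loop: .inl = early return, .inr = updated counter.
-- `specDef[r][c]` is ported with pyGetD: where Python would raise (specDef None, or the
-- reportCount = 12 row-index overrun) the inputs are excluded by Pre_ below.
def pvColLoopA (spec : List (List Bool)) (r : Int) (cols : List Int)
    (counter currentSeq : Int) : Sum (Int × Int) Int :=
  match cols with
  | [] => .inr counter
  | c :: rest =>
    let cell := PySem.List.pyGetD (PySem.List.pyGetD spec r []) c false
    let counter' := if cell then counter + 1 else counter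
    if counter' = currentSeq then .inl (r + 1, c + 1)
    else pvColLoopA spec r rest counter' currentSeq

-- outer `for r in range(maxRow)` loop
def pvRowLoopA (spec : List (List Bool)) (rows : List Int) (maxCol currentSeq : Int)
    (counter : Int) : Int × Int :=
  match rows with
  | [] => (-1, -1)
  | r :: rest =>
    match pvColLoopA spec r (PySem.List.pyRange 0 maxCol 1) counter currentSeq with
    | .inl p => p
    | .inr counter' => pvRowLoopA spec rest maxCol currentSeq counter'

def getRowAndColPos (currentSeq : Int) (reportCount : Int) : Int × Int :=
  match getSpecDef reportCount with
  | (maxRow, maxCol, spec) =>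
    pvRowLoopA (spec.getD []) (PySem.List.pyRange 0 maxRow 1) maxCol currentSeq 0

-- ===== PORT B =====
-- Source B's _POSITIONS dict; Python's `_POSITIONS[reportCount]` raises KeyError for
-- reportCount outside 1..12 (excluded by Pre_), here ported with getD [].
def pvPositionsB : PySem.Dict Int (List (Int × Int)) := PySem.Dict.ofList [
  (1, [(1, 1)]),
  (2, [(1, 1), (1, 2)]),
  (3, [(1, 1), (1, 2), (1, 3)]),
  (4, [(1, 1), (1, 2), (2, 1), (2, 2)]),
  (5, [(1, 1), (1, 2), (1, 3), (2, 1), (2, 2)]),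
  (6, [(1, 1), (1, 2), (1, 3), (2, 1), (2, 2), (2, 3)]),
  (7, [(1, 1), (1, 2), (1, 3), (2, 1), (2, 2), (2, 3), (3, 3)]),
  (8, [(1, 1), (1, 2), (1, 3), (2, 2), (2, 3), (3, 1), (3, 2), (3, 3)]),
  (9, [(1, 1), (1, 2), (1, 3), (2, 1), (2, 2), (2, 3), (3, 1), (3, 2), (3, 3)]),
  (10, [(1, 1), (1, 2), (1, 3), (2, 1), (2, 2), (2, 3), (3, 1), (3, 2), (3, 3), (4, 3)]),
  (11, [(1, 1), (1, 2), (1, 3), (2, 1), (2, 2), (2, 3), (3, 1), (3, 2), (3, 3), (4, 2), (4, 3)]),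
  (12, [(1, 1), (1, 2), (1, 3), (2, 1), (2, 2), (2, 3), (3, 1), (3, 2), (3, 3)])]

def getRowAndColPos_alt (currentSeq : Int) (reportCount : Int) : Int × Int :=
  let positions := PySem.Dict.getD pvPositionsB reportCount []
  if 1 ≤ currentSeq ∧ currentSeq ≤ (positions.length : Int) then
    PySem.List.pyGetD positions (currentSeq - 1) (-1, -1)
  else (-1, -1)

-- ===== PRECONDITION & SPEC =====
-- Pre_ excludes exactly the inputs where Python A raises: reportCount outside 1..12
-- (specDef is None → TypeError), and reportCount = 12 with currentSeq outside 1..9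
-- (maxRows = 4 but the grid has 3 rows → IndexError once the loop reaches row 3).
def Pre_getRowAndColPos (currentSeq : Int) (reportCount : Int) : Prop :=
  (1 ≤ reportCount ∧ reportCount ≤ 12) ∧ (reportCount = 12 → 1 ≤ currentSeq ∧ currentSeq ≤ 9)
instance (currentSeq : Int) (reportCount : Int) : Decidable (Pre_getRowAndColPos currentSeq reportCount) := by unfold Pre_getRowAndColPos; infer_instance
def pvWitness_getRowAndColPos : Int × Int := (3, 5)

def Spec_getRowAndColPos (currentSeq : Int) (reportCount : Int) (out : Int × Int) : Prop := out = getRowAndColPos_alt currentSeq reportCount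
instance (currentSeq : Int) (reportCount : Int) (out : Int × Int) : Decidable (Spec_getRowAndColPos currentSeq reportCount out) := by unfold Spec_getRowAndColPos; infer_instance

-- ===== CLAIM (what is proved, stated in full; the proofs are below) =====
def Claim_equal_getRowAndColPos : Prop := ∀ (currentSeq : Int) (reportCount : Int), Dom_getRowAndColPos currentSeq reportCount → Pre_getRowAndColPos currentSeq reportCount → Spec_getRowAndColPos currentSeq reportCount (getRowAndColPos currentSeq reportCount)

-- ===== LEMMAS AND PROOFS =====
theorem pvRange1 : PySem.List.pyRange 0 1 1 = [0] := by decide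
theorem pvRange2 : PySem.List.pyRange 0 2 1 = [0, 1] := by decide
theorem pvRange3 : PySem.List.pyRange 0 3 1 = [0, 1, 2] := by decide
theorem pvRange4 : PySem.List.pyRange 0 4 1 = [0, 1, 2, 3] := by decide

-- ===== VERDICT (by name: the statement is the Claim_ definition above) =====
theorem getRowAndColPos_spec : Claim_equal_getRowAndColPos := by
  intro cs rc _hdom hpre
  obtain ⟨⟨hr1, hr2⟩, h12⟩ := hpre
  show getRowAndColPos cs rc = getRowAndColPos_alt cs rc
  by_cases hin : 1 ≤ cs ∧ cs ≤ 11
  · obtain ⟨hc1, hc2⟩ := hin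
    interval_cases rc <;> interval_cases cs <;> decide
  · have hr2' : rc ≤ 11 := by
      rcases eq_or_ne rc 12 with h | h
      · have := h12 h; omega
      · omega
    have hB : getRowAndColPos_alt cs rc = (-1, -1) := by
      have hlen : ∀ (l : List (Int × Int)), l.length ≤ 11 →
          (if 1 ≤ cs ∧ cs ≤ (l.length : Int) then PySem.List.pyGetD l (cs - 1) (-1, -1) else (-1, -1)) = (-1, -1) := by
        intro l hl
        rw [if_neg]; omega
      simp only [getRowAndColPos_alt]
      apply hlen
      clear h12; interval_cases rc <;> decide
    rw [hB]
    have n1 : ¬ ((1:Int) = cs) := by omega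
    have n2 : ¬ ((2:Int) = cs) := by omega
    have n3 : ¬ ((3:Int) = cs) := by omega
    have n4 : ¬ ((4:Int) = cs) := by omega
    have n5 : ¬ ((5:Int) = cs) := by omega
    have n6 : ¬ ((6:Int) = cs) := by omega
    have n7 : ¬ ((7:Int) = cs) := by omega
    have n8 : ¬ ((8:Int) = cs) := by omega
    have n9 : ¬ ((9:Int) = cs) := by omega
    have n10 : ¬ ((10:Int) = cs) := by omega
    have n11 : ¬ ((11:Int) = cs) := by omega
    clear h12
    interval_cases rc <;>
      simp [getRowAndColPos, getSpecDef, pvRange1, pvRange2,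
        pvRange3, pvRange4, pvRowLoopA, pvColLoopA, PySem.List.pyGetD, *]
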